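-- pv_equiv track=rewrite | github.com/Powaildi/Optifine_CTM_Fusion_Patch | src/classes/JsonFileClasses.py | gettexturebyproperty
-- ===== SOURCE A (Python) =====
-- def gettexturebyproperty(property:dict,texture:str):
--     """ 获取修改后的材质，但是没有修改到的为None """
--     faces = property.get("faces")
--     top = None
--     bottom = None
--     north = None
--     south = None
--     west = None
--     east = None
--     if faces:
--         for face in faces:
--             match face:
--                 case "top":
--                     top = texture
--                 case "bottom":
--                     bottom = texture
--                 case "north":
--                     north = texture
--                 case "south":
--                     south = texture
--                 case "west":
--                     west = texture
--                 case "east":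
--                     east = texture
--                 case "sides":
--                     north = texture
--                     south = texture
--                     west = texture
--                     east = texture
--                 case "all":
--                     top = texture
--                     bottom = texture
--                     north = texture
--                     south = texture
--                     west = texture
--                     east = texture
--     else:
--             #没有默认为all
--         top = texture
--         bottom = texture
--         north = texture
--         south = texture
--         west = texture
--         east = texture
--
--     return [top,bottom,north,south,west,east]
-- ===== SOURCE B (Python) =====
-- def gettexturebyproperty(property: dict, texture: str):
--     """Per-direction formulation: each output slot is texture iff the face set
--     mentions a face covering that direction; empty/missing faces means all."""
--     faces = property.get("faces")
--     if not faces: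
--         return [texture] * 6
--     fs = set(faces)
--     def covered(covering):
--         return texture if fs & covering else None
--     return [
--         covered({"top", "all"}),
--         covered({"bottom", "all"}),
--         covered({"north", "sides", "all"}),
--         covered({"south", "sides", "all"}),
--         covered({"west", "sides", "all"}),
--         covered({"east", "sides", "all"}),
--     ]
-- ===== Notes on version B (the rewrite author's own statement) =====
-- stated objective: alternative
-- what changed: Inverts the traversal: instead of A's single pass over faces mutating six variables through an 8-way match, B builds a set of the faces once and computes each of the six output directions independently by a set-intersection test with the faces that cover it (correct because every assignment writes the same value, so only coverage matters, not order).
import Mathlib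
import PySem

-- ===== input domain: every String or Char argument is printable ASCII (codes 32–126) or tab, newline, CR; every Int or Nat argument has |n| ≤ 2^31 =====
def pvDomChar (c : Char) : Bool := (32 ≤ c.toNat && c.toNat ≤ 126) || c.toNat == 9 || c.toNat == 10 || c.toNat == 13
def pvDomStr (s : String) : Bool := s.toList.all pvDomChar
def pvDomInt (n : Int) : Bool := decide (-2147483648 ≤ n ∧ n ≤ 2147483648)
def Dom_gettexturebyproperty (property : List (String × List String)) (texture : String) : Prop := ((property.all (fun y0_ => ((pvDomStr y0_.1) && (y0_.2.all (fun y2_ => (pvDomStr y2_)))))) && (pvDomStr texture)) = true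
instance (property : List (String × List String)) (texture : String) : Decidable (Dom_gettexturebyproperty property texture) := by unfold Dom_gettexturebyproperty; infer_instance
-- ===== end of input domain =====

-- B inverts the traversal: instead of one pass over faces mutating six variables,
-- it builds the face set once and decides each output direction independently
-- by a set-intersection test with the faces covering it (objective: alternative).

-- ===== PORT A =====
-- state is the six variables (top, bottom, north, south, west, east)
def gettexturebyproperty (property : List (String × List String)) (texture : String) : List (Option String) :=
  -- property.get("faces"): first-match association-list lookup
  let faces : Option (List String) := (property.find? (fun p => p.1 == "faces")).map Prod.snd
  let st0 : Option String × Option String × Option String × Option String × Option String × Option String :=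
    (none, none, none, none, none, none)
  match faces with
  | some fs =>
    if fs ≠ [] then
      -- the for-loop over faces with the match statement
      let st := fs.foldl (fun (st : Option String × Option String × Option String × Option String × Option String × Option String) face =>
        let (top, bottom, north, south, west, east) := st
        if face == "top" then (some texture, bottom, north, south, west, east)
        else if face == "bottom" then (top, some texture, north, south, west, east)
        else if face == "north" then (top, bottom, some texture, south, west, east)
        else if face == "south" then (top, bottom, north, some texture, west, east)
        else if face == "west" then (top, bottom, north, south, some texture, east)
        else if face == "east" then (top, bottom, north, south, west, some texture)
        else if face == "sides" then (top, bottom, some texture, some texture, some texture, some texture)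
        else if face == "all" then (some texture, some texture, some texture, some texture, some texture, some texture)
        else st) st0
      [st.1, st.2.1, st.2.2.1, st.2.2.2.1, st.2.2.2.2.1, st.2.2.2.2.2]
    else
      [some texture, some texture, some texture, some texture, some texture, some texture]
  | none =>
      [some texture, some texture, some texture, some texture, some texture, some texture]

-- ===== PORT B =====
def gettexturebyproperty_alt (property : List (String × List String)) (texture : String) : List (Option String) :=
  let faces : Option (List String) := (property.find? (fun p => p.1 == "faces")).map Prod.snd
  match faces with
  | none => [some texture, some texture, some texture, some texture, some texture, some texture]
  | some faces =>
    if faces = [] then [some texture, some texture, some texture, some texture, some texture, some texture]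
    else
      -- fs = set(faces)
      let fs : PySem.Set String := PySem.Set.ofList faces
      -- covered(covering) = texture if fs & covering else None
      let covered : List String → Option String := fun covering =>
        if PySem.Set.inter fs covering ≠ [] then some texture else none
      [covered ["top", "all"],
       covered ["bottom", "all"],
       covered ["north", "sides", "all"],
       covered ["south", "sides", "all"],
       covered ["west", "sides", "all"],
       covered ["east", "sides", "all"]]

-- ===== PRECONDITION & SPEC =====
def Spec_gettexturebyproperty (property : List (String × List String)) (texture : String) (out : List (Option String)) : Prop := out = gettexturebyproperty_alt property texture
instance (property : List (String × List String)) (texture : String) (out : List (Option String)) : Decidable (Spec_gettexturebyproperty property texture out) := by unfold Spec_gettexturebyproperty; infer_instance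

-- ===== CLAIM (what is proved, stated in full; the proofs are below) =====
def Claim_equal_gettexturebyproperty : Prop := ∀ (property : List (String × List String)) (texture : String), Dom_gettexturebyproperty property texture → Spec_gettexturebyproperty property texture (gettexturebyproperty property texture)

-- ===== LEMMAS AND PROOFS =====

-- A's loop body, named for the lemmas (identical to the lambda in the port of A)
def pvStep (texture : String)
    (st : Option String × Option String × Option String × Option String × Option String × Option String)
    (face : String) :
    Option String × Option String × Option String × Option String × Option String × Option String :=
  let (top, bottom, north, south, west, east) := st
  if face == "top" then (some texture, bottom, north, south, west, east)
  else if face == "bottom" then (top, some texture, north, south, west, east)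
  else if face == "north" then (top, bottom, some texture, south, west, east)
  else if face == "south" then (top, bottom, north, some texture, west, east)
  else if face == "west" then (top, bottom, north, south, some texture, east)
  else if face == "east" then (top, bottom, north, south, west, some texture)
  else if face == "sides" then (top, bottom, some texture, some texture, some texture, some texture)
  else if face == "all" then (some texture, some texture, some texture, some texture, some texture, some texture)
  else st

-- characterization of A's fold: each component is texture iff a covering face occurs
theorem pv_fold_char (texture : String) (fs : List String)
    (t b n s w e : Option String) :
    fs.foldl (pvStep texture) (t, b, n, s, w, e) =
      ((if "top" ∈ fs ∨ "all" ∈ fs then some texture else t),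
       (if "bottom" ∈ fs ∨ "all" ∈ fs then some texture else b),
       (if "north" ∈ fs ∨ "sides" ∈ fs ∨ "all" ∈ fs then some texture else n),
       (if "south" ∈ fs ∨ "sides" ∈ fs ∨ "all" ∈ fs then some texture else s),
       (if "west" ∈ fs ∨ "sides" ∈ fs ∨ "all" ∈ fs then some texture else w),
       (if "east" ∈ fs ∨ "sides" ∈ fs ∨ "all" ∈ fs then some texture else e)) := by
  induction fs generalizing t b n s w e with
  | nil => simp
  | cons f rest ih =>
    simp only [List.foldl_cons, List.mem_cons]
    rw [show (pvStep texture (t, b, n, s, w, e) f) =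
      ((pvStep texture (t, b, n, s, w, e) f).1,
       (pvStep texture (t, b, n, s, w, e) f).2.1,
       (pvStep texture (t, b, n, s, w, e) f).2.2.1,
       (pvStep texture (t, b, n, s, w, e) f).2.2.2.1,
       (pvStep texture (t, b, n, s, w, e) f).2.2.2.2.1,
       (pvStep texture (t, b, n, s, w, e) f).2.2.2.2.2) from rfl, ih]
    by_cases h1 : f = "top"
    · subst h1; simp [pvStep]
    by_cases h2 : f = "bottom"
    · subst h2; simp [pvStep]
    by_cases h3 : f = "north"
    · subst h3; simp [pvStep]
    by_cases h4 : f = "south"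
    · subst h4; simp [pvStep]
    by_cases h5 : f = "west"
    · subst h5; simp [pvStep]
    by_cases h6 : f = "east"
    · subst h6; simp [pvStep]
    by_cases h7 : f = "sides"
    · subst h7; simp [pvStep]
    by_cases h8 : f = "all"
    · subst h8; simp [pvStep]
    · simp [pvStep, h1, h2, h3, h4, h5, h6, h7, h8,
        Ne.symm h1, Ne.symm h2, Ne.symm h3, Ne.symm h4, Ne.symm h5, Ne.symm h6, Ne.symm h7, Ne.symm h8]

-- B's covered test, rewritten to a membership disjunction
theorem pv_covered (texture : String) (fs cov : List String) :
    (if ¬ PySem.Set.inter (PySem.Set.ofList fs) cov = [] then some texture else (none : Option String))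
      = if ∃ x ∈ cov, x ∈ fs then some texture else none := by
  have hiff : PySem.Set.inter (PySem.Set.ofList fs) cov = [] ↔ ¬ ∃ x ∈ cov, x ∈ fs := by
    constructor
    · intro hnil ⟨x, hxc, hxf⟩
      have : x ∈ PySem.Set.inter (PySem.Set.ofList fs) cov := by
        rw [PySem.Set.mem_inter, PySem.Set.mem_ofList]; exact ⟨hxf, hxc⟩
      simp [hnil] at this
    · intro h
      by_contra hne
      rcases List.exists_mem_of_ne_nil _ hne with ⟨x, hx⟩
      rw [PySem.Set.mem_inter, PySem.Set.mem_ofList] at hx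
      exact h ⟨x, hx.2, hx.1⟩
  by_cases h : ∃ x ∈ cov, x ∈ fs
  · rw [if_pos h, if_pos (by rw [hiff]; exact not_not_intro h)]
  · rw [if_neg h, if_neg (not_not_intro (hiff.mpr h))]

-- ===== VERDICT (by name: the statement is the Claim_ definition above) =====
theorem gettexturebyproperty_spec : Claim_equal_gettexturebyproperty := by
  intro property texture _
  unfold Spec_gettexturebyproperty
  simp only [gettexturebyproperty, gettexturebyproperty_alt]
  cases hf : (property.find? (fun p => p.1 == "faces")).map Prod.snd with
  | none => rfl
  | some fs =>
    by_cases hfs : fs = []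
    · subst hfs; rfl
    · simp only [ne_eq, hfs, not_false_eq_true, if_true]
      rw [show (fun (st : Option String × Option String × Option String × Option String × Option String × Option String) face =>
        let (top, bottom, north, south, west, east) := st
        if face == "top" then (some texture, bottom, north, south, west, east)
        else if face == "bottom" then (top, some texture, north, south, west, east)
        else if face == "north" then (top, bottom, some texture, south, west, east)
        else if face == "south" then (top, bottom, north, some texture, west, east)
        else if face == "west" then (top, bottom, north, south, some texture, east)
        else if face == "east" then (top, bottom, north, south, west, some texture)
        else if face == "sides" then (top, bottom, some texture, some texture, some texture, some texture)
        else if face == "all" then (some texture, some texture, some texture, some texture, some texture, some texture)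
        else st) = pvStep texture from rfl]
      rw [pv_fold_char]
      dsimp only
      rw [if_neg not_false]
      simp only [pv_covered, List.cons.injEq, and_true]
      refine ⟨?_, ?_, ?_, ?_, ?_, ?_⟩ <;>
        · refine if_congr ?_ rfl rfl
          simp only [List.mem_cons, List.not_mem_nil, or_false, exists_eq_or_imp, exists_eq_left]
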